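-- pv_equiv track=rewrite | github.com/funashima/Metis | Metis/SpaceGroup/SpaceGroup.py | get_compound_name
-- ===== SOURCE A (Python) =====
-- def get_compound_name(atomic_positions):
--     natoms = None
--     compound = ''
--     pre_element = None
--     for atom in atomic_positions:
--         element = atom['element']
--         if pre_element != element:
--             if pre_element is not None:
--                 compound += str(natoms)
--             compound += element
--             natoms = 1
--             pre_element = element
--         else:
--             natoms += 1
--     compound += str(natoms)
--     return compound
-- ===== SOURCE B (Python) =====
-- def get_compound_name(atomic_positions):
--     # Run-length scan: for each maximal run of equal consecutive elements,
--     # emit element + count, then join.  Returns '' (not 'None') for no atoms.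
--     parts = []
--     i = 0
--     n = len(atomic_positions)
--     while i < n:
--         element = atomic_positions[i]['element']
--         j = i + 1
--         while j < n and atomic_positions[j]['element'] == element:
--             j += 1
--         parts.append(element + str(j - i))
--         i = j
--     return ''.join(parts)
-- ===== Notes on version B (the rewrite author's own statement) =====
-- stated objective: idiomatic
-- what changed: B replaces A's single accumulator loop with pre_element/natoms state by a two-pointer run-length scan that builds a list of 'element+count' parts and joins them, returning '' rather than 'None' on an empty input.
-- intended difference: On the empty list A returns the literal string 'None' (str of its never-initialised natoms sentinel) while B returns '', which is the intended name for a compound with no atoms. — e.g. on get_compound_name([]): A returns "None", B returns ""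
import Mathlib
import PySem

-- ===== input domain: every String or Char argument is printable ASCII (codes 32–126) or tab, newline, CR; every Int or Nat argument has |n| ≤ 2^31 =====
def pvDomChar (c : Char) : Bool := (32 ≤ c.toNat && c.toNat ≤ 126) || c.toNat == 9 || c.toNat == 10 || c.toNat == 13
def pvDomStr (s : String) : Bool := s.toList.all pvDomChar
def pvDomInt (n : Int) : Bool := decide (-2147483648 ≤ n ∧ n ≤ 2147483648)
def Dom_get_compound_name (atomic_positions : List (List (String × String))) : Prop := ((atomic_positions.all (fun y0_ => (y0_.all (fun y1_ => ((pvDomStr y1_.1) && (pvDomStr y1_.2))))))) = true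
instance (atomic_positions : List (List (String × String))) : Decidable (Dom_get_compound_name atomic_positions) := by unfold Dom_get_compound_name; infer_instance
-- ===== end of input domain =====

-- B builds the name by a run-length scan joined at the end instead of A's pre_element/natoms
-- accumulator; intended difference: B returns "" (not "None") for an empty list (return value only).

-- atom['element']: first-match association-list lookup (dict convention); the getD "" default is
-- unreachable inside Pre_get_compound_name, which excludes the KeyError inputs.
def pvElemOf (atom : List (String × String)) : String := (List.lookup "element" atom).getD ""

-- ===== PORT A =====
-- str(natoms) where natoms is None or an int
def pvStrOpt : Option Int → String
  | none => "None"
  | some n => PySem.Int.toStr n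

-- the for-loop over atomic_positions with state (natoms, compound, pre_element), then the final append
def pvALoop : List (List (String × String)) → Option Int → String → Option String → String
  | [], natoms, compound, _ => compound ++ pvStrOpt natoms
  | atom :: rest, natoms, compound, pre_element =>
    let element := pvElemOf atom
    if pre_element ≠ some element then
      let compound := if pre_element ≠ none then compound ++ pvStrOpt natoms else compound
      pvALoop rest (some 1) (compound ++ element) (some element)
    else
      pvALoop rest (natoms.map (· + 1)) compound pre_element

def get_compound_name (atomic_positions : List (List (String × String))) : String :=
  pvALoop atomic_positions none "" none

-- ===== PORT B =====
-- outer while: take one maximal run per step (inner while = takeWhile/dropWhile on the tail)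
def pvBParts : List (List (String × String)) → List String
  | [] => []
  | atom :: rest =>
    let element := pvElemOf atom
    let run := rest.takeWhile (fun a => pvElemOf a == element)
    let rest' := rest.dropWhile (fun a => pvElemOf a == element)
    (element ++ PySem.Int.toStr (1 + run.length)) :: pvBParts rest'
  termination_by l => l.length
  decreasing_by
    have := List.length_dropWhile_le (fun a => pvElemOf a == pvElemOf atom) rest
    simp only [List.length_cons]
    omega

def get_compound_name_alt (atomic_positions : List (List (String × String))) : String :=
  PySem.Str.join "" (pvBParts atomic_positions)

-- ===== PRECONDITION & SPEC =====
-- Pre_ excludes exactly the inputs where A raises KeyError: some atom dict lacks the 'element' key.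
def Pre_get_compound_name (atomic_positions : List (List (String × String))) : Prop :=
  ∀ atom ∈ atomic_positions, (List.lookup "element" atom).isSome = true
instance (atomic_positions : List (List (String × String))) : Decidable (Pre_get_compound_name atomic_positions) := by unfold Pre_get_compound_name; infer_instance
def pvWitness_get_compound_name : (List (List (String × String))) := [[("element", "Si")], [("element", "Si")], [("element", "O")]]

-- On the empty list A returns the literal string "None" (str of its never-initialised natoms
-- sentinel) while B returns "", the intended name for a compound with no atoms.
def D_get_compound_name (atomic_positions : List (List (String × String))) : Prop :=
  atomic_positions = []
instance (atomic_positions : List (List (String × String))) : Decidable (D_get_compound_name atomic_positions) := by unfold D_get_compound_name; infer_instance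

def Spec_get_compound_name (atomic_positions : List (List (String × String))) (out : String) : Prop := ¬ D_get_compound_name atomic_positions → out = get_compound_name_alt atomic_positions
instance (atomic_positions : List (List (String × String))) (out : String) : Decidable (Spec_get_compound_name atomic_positions out) := by unfold Spec_get_compound_name; infer_instance

def pvDiffWitness_get_compound_name : (List (List (String × String))) := []
def pvDiffWitnessOut_get_compound_name : String × String := ("None", "")

-- ===== CLAIM (what is proved, stated in full; the proofs are below) =====
def Claim_unchanged_get_compound_name : Prop := ∀ (atomic_positions : List (List (String × String))), Dom_get_compound_name atomic_positions → Pre_get_compound_name atomic_positions → Spec_get_compound_name atomic_positions (get_compound_name atomic_positions)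
def Claim_changed_get_compound_name : Prop := Dom_get_compound_name (pvDiffWitness_get_compound_name) ∧ Pre_get_compound_name (pvDiffWitness_get_compound_name) ∧ D_get_compound_name (pvDiffWitness_get_compound_name) ∧ get_compound_name (pvDiffWitness_get_compound_name) = pvDiffWitnessOut_get_compound_name.1 ∧ get_compound_name_alt (pvDiffWitness_get_compound_name) = pvDiffWitnessOut_get_compound_name.2 ∧ pvDiffWitnessOut_get_compound_name.1 ≠ pvDiffWitnessOut_get_compound_name.2
def Claim_exact_get_compound_name : Prop := ∀ (atomic_positions : List (List (String × String))), Dom_get_compound_name atomic_positions → Pre_get_compound_name atomic_positions → D_get_compound_name atomic_positions → get_compound_name atomic_positions ≠ get_compound_name_alt atomic_positions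

-- ===== LEMMAS AND PROOFS =====

lemma pvBParts_nil : pvBParts [] = [] := by simp [pvBParts]

lemma pvBParts_cons (atom : List (String × String)) (rest : List (List (String × String))) :
    pvBParts (atom :: rest) =
      (pvElemOf atom ++ PySem.Int.toStr (1 + ((rest.takeWhile (fun a => pvElemOf a == pvElemOf atom)).length : Int)))
        :: pvBParts (rest.dropWhile (fun a => pvElemOf a == pvElemOf atom)) := by
  simp [pvBParts]

lemma pvJoin_empty_nil : PySem.Str.join "" [] = "" := by
  simp [PySem.Str.join, PySem.Chars.join, List.intercalate]

lemma pvJoin_empty_cons (x : String) (xs : List String) :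
    PySem.Str.join "" (x :: xs) = x ++ PySem.Str.join "" xs := by
  simp [PySem.Str.join, PySem.Chars.join, List.intercalate]
  cases xs <;> simp

-- running A's loop from a mid-run state (natoms = n, current element e) produces the
-- remaining count for the current run followed by B's parts for the rest
lemma pvALoop_run (l : List (List (String × String))) :
    ∀ (n : Int) (c : String) (e : String),
      pvALoop l (some n) c (some e) =
        c ++ PySem.Int.toStr (n + ((l.takeWhile (fun a => pvElemOf a == e)).length : Int))
          ++ PySem.Str.join "" (pvBParts (l.dropWhile (fun a => pvElemOf a == e))) := by
  induction l with
  | nil =>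
    intro n c e
    simp [pvALoop, pvStrOpt, pvBParts_nil, pvJoin_empty_nil]
  | cons a t ih =>
    intro n c e
    by_cases h : pvElemOf a = e
    · -- same element: the run continues
      rw [List.takeWhile_cons_of_pos (by simp [h]), List.dropWhile_cons_of_pos (by simp [h])]
      have hstep : pvALoop (a :: t) (some n) c (some e) = pvALoop t (some (n + 1)) c (some e) := by
        simp [pvALoop, h]
      rw [hstep, ih]
      congr 2
      congr 1
      push_cast [List.length_cons]
      ring
    · -- new element: flush str(natoms), start a fresh run
      rw [List.takeWhile_cons_of_neg (by simp [h]), List.dropWhile_cons_of_neg (by simp [h])]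
      have hstep : pvALoop (a :: t) (some n) c (some e) =
          pvALoop t (some 1) ((c ++ pvStrOpt (some n)) ++ pvElemOf a) (some (pvElemOf a)) := by
        simp [pvALoop, Ne.symm h]
      rw [hstep, ih, pvBParts_cons, pvJoin_empty_cons]
      simp [pvStrOpt, String.append_assoc]

-- ===== VERDICT (by name: the statement is the Claim_ definition above) =====
theorem get_compound_name_spec : Claim_unchanged_get_compound_name := by
  intro l _ _ hD
  match l with
  | [] => exact absurd rfl hD
  | a :: t =>
    have h0 : get_compound_name (a :: t) = pvALoop t (some 1) ("" ++ pvElemOf a) (some (pvElemOf a)) := by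
      simp [get_compound_name, pvALoop]
    rw [h0, pvALoop_run, get_compound_name_alt, pvBParts_cons, pvJoin_empty_cons]
    simp [String.append_assoc]

theorem get_compound_name_changed : Claim_changed_get_compound_name := by
  unfold Claim_changed_get_compound_name
  refine ⟨by decide, by decide, rfl, by decide, ?_, by decide⟩
  show get_compound_name_alt [] = ""
  rw [get_compound_name_alt, pvBParts_nil, pvJoin_empty_nil]

theorem get_compound_name_tight : Claim_exact_get_compound_name := by
  intro l _ _ hd
  subst hd
  have hB : get_compound_name_alt [] = "" := by
    rw [get_compound_name_alt, pvBParts_nil, pvJoin_empty_nil]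
  rw [hB]
  decide
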